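-- pv_equiv track=rewrite | github.com/mbhaylett23/NupackHairpin | match_analysis.py | try_all_matches
-- ===== SOURCE A (Python) =====
-- def score_match(subject, query, subject_start, query_start, length):
--     '''Compute similarity score between two sequences'''
--     score = sum(1 if subject[i + subject_start] == query[i + query_start] else -1 for i in range(length))
--     return score
--
-- def try_all_matches(subject, query, score_limit):
--     '''Find all matches of `subject` in `query` with score >= score_limit'''
--     matches = []
--     subject_len = len(subject)
--     max_start = len(query) - subject_len + 1
--     for query_start in range(max_start):
--         score = score_match(subject, query, 0, query_start, subject_len)
--         if score >= score_limit:
--             query_end = query_start + subject_len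
--             matches.append((True, query_start, query_end, subject_len, score))
--     return matches if matches else [(False, None, None, None, None)]
-- ===== SOURCE B (Python) =====
-- def try_all_matches(subject, query, score_limit):
--     '''Find all matches of `subject` in `query` with score >= score_limit'''
--     n = len(subject)
--     # transposed accumulation: one score cell per window offset, updated per subject position
--     scores = [0] * (len(query) - n + 1)
--     for i, c in enumerate(subject):
--         scores = [s + (1 if c == query[qs + i] else -1) for qs, s in enumerate(scores)]
--     matches = [(True, qs, qs + n, n, s) for qs, s in enumerate(scores) if s >= score_limit]
--     return matches if matches else [(False, None, None, None, None)]
-- ===== Notes on version B (the rewrite author's own statement) =====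
-- stated objective: alternative
-- what changed: B transposes the two loops: instead of re-scanning each query window with score_match, it keeps one running score per window offset and makes a single pass over the subject, updating all offsets at each subject position, then emits the qualifying offsets in one final pass.
import Mathlib
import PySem

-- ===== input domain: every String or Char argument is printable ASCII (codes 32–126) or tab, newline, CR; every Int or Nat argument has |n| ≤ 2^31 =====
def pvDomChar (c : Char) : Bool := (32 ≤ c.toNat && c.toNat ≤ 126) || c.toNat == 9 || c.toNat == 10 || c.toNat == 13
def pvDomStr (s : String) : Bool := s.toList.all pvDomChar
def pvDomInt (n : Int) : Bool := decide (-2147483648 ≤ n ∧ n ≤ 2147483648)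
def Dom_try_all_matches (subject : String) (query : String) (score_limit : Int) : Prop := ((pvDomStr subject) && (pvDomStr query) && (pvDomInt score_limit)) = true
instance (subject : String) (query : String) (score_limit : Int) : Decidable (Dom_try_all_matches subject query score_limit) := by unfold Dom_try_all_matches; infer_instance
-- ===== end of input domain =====

-- B replaces A's per-window rescanning (score_match per offset) by a transposed accumulation:
-- one running score per window offset, updated in a single pass over the subject (alternative, same cost).


-- ===== PORT A =====
-- indices reached by try_all_matches are always in range, so pyGet? never returns none there
def score_match (subject : String) (query : String) (subject_start : Int) (query_start : Int) (length : Int) : Int :=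
  ((PySem.List.pyRange 0 length 1).map (fun i =>
    if PySem.Chars.pyGet? subject.toList (i + subject_start) = PySem.Chars.pyGet? query.toList (i + query_start)
    then (1 : Int) else -1)).sum

def try_all_matches (subject : String) (query : String) (score_limit : Int) : List (Bool × Option Int × Option Int × Option Int × Option Int) :=
  let subject_len : Int := PySem.Str.len subject
  let max_start : Int := PySem.Str.len query - subject_len + 1
  let matchList := (PySem.List.pyRange 0 max_start 1).foldl
    (fun acc query_start =>
      let score := score_match subject query 0 query_start subject_len
      if score ≥ score_limit then
        acc ++ [(true, some query_start, some (query_start + subject_len), some subject_len, some score)]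
      else acc) []
  if matchList = [] then [(false, none, none, none, none)] else matchList

-- ===== PORT B =====
def try_all_matches_alt (subject : String) (query : String) (score_limit : Int) : List (Bool × Option Int × Option Int × Option Int × Option Int) :=
  let n : Int := PySem.Str.len subject
  let scores0 : List Int := PySem.List.pyRepeat [0] (PySem.Str.len query - n + 1)
  let scores := (PySem.List.enumerate subject.toList 0).foldl
    (fun sc p =>
      (PySem.List.enumerate sc 0).map
        (fun q => q.2 + (if some p.2 = PySem.Chars.pyGet? query.toList (q.1 + p.1) then (1 : Int) else -1)))
    scores0
  let matchList := ((PySem.List.enumerate scores 0).filter (fun q => decide (q.2 ≥ score_limit))).map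
    (fun q => (true, some q.1, some (q.1 + n), some n, some q.2))
  if matchList = [] then [(false, none, none, none, none)] else matchList

-- ===== PRECONDITION & SPEC =====
def Spec_try_all_matches (subject : String) (query : String) (score_limit : Int) (out : List (Bool × Option Int × Option Int × Option Int × Option Int)) : Prop := out = try_all_matches_alt subject query score_limit
instance (subject : String) (query : String) (score_limit : Int) (out : List (Bool × Option Int × Option Int × Option Int × Option Int)) : Decidable (Spec_try_all_matches subject query score_limit out) := by unfold Spec_try_all_matches; infer_instance

-- ===== CLAIM (what is proved, stated in full; the proofs are below) =====
def Claim_equal_try_all_matches : Prop := ∀ (subject : String) (query : String) (score_limit : Int), Dom_try_all_matches subject query score_limit → Spec_try_all_matches subject query score_limit (try_all_matches subject query score_limit)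

-- ===== LEMMAS AND PROOFS =====

lemma enum_map_pyRange {α : Type} (M : Nat) (g : Int → α) [Inhabited α] :
    PySem.List.enumerate ((PySem.List.pyRange 0 (M:Int) 1).map g) 0
    = (PySem.List.pyRange 0 (M:Int) 1).map (fun j => (j, g j)) := by
  rw [PySem.List.enumerate_eq_map_pyRange (d := default)]
  have hlen : PySem.List.len ((PySem.List.pyRange 0 (M:Int) 1).map g) = (M:Int) := by
    simp [PySem.List.len, PySem.List.length_pyRange_one]
  rw [hlen]
  apply List.map_congr_left
  intro j hj
  rw [PySem.List.mem_pyRange_one] at hj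
  rw [PySem.List.pyGetD_map_pyRange_of_nonneg g (M:Int) j default hj.1 hj.2]

lemma loop_scores (qL : List Char) (M : Nat) (ps : List (Int × Char)) : ∀ (g : Int → Int),
    ps.foldl (fun sc p => (PySem.List.enumerate sc 0).map
        (fun q => q.2 + (if some p.2 = PySem.Chars.pyGet? qL (q.1 + p.1) then (1:Int) else -1)))
      ((PySem.List.pyRange 0 (M:Int) 1).map g)
    = (PySem.List.pyRange 0 (M:Int) 1).map (fun qs =>
        g qs + (ps.map (fun p => if some p.2 = PySem.Chars.pyGet? qL (qs + p.1) then (1:Int) else -1)).sum) := by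
  induction ps with
  | nil => intro g; simp
  | cons p ps ih =>
    intro g
    simp only [List.foldl_cons]
    rw [enum_map_pyRange, List.map_map]
    have : ((fun q : Int × Int => q.2 + (if some p.2 = PySem.Chars.pyGet? qL (q.1 + p.1) then (1:Int) else -1)) ∘ (fun j => (j, g j)))
        = fun j => g j + (if some p.2 = PySem.Chars.pyGet? qL (j + p.1) then (1:Int) else -1) := rfl
    rw [this, ih]
    apply List.map_congr_left
    intro qs _
    simp [add_assoc]

lemma F_eq_score_match (subject query : String) (qs : Int) :
    ((PySem.List.enumerate subject.toList 0).map (fun p =>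
        if some p.2 = PySem.Chars.pyGet? query.toList (qs + p.1) then (1:Int) else -1)).sum
    = score_match subject query 0 qs (PySem.Str.len subject) := by
  rw [PySem.List.enumerate_eq_map_pyRange (d := 'a'), List.map_map]
  unfold score_match
  have hlen : PySem.List.len subject.toList = PySem.Str.len subject := by
    simp [PySem.List.len, PySem.Str.len_eq]
  rw [hlen]
  congr 1
  apply List.map_congr_left
  intro j hj
  rw [PySem.List.mem_pyRange_one] at hj
  have h0 : (0:Int) ≤ j := hj.1
  have hlt : j < (subject.toList.length : Int) := by
    have := hj.2; rwa [PySem.Str.len_eq] at this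
  have hget : PySem.Chars.pyGet? subject.toList (j + 0) = some (PySem.List.pyGetD subject.toList j 'a') := by
    simp only [add_zero]
    rw [PySem.List.pyGetD_eq_getElem _ 'a' h0 hlt]
    have := PySem.List.pyGet?_ofNat subject.toList j.toNat (by omega)
    rwa [Int.toNat_of_nonneg h0] at this
  rw [hget]
  simp only [Function.comp_apply]
  rw [add_comm qs j]


theorem tam_eq (subject query : String) (score_limit : Int) :
    try_all_matches subject query score_limit = try_all_matches_alt subject query score_limit := by
  unfold try_all_matches try_all_matches_alt
  simp only []
  set n := PySem.Str.len subject with hn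
  set ms := PySem.Str.len query - n + 1 with hms
  set M := ms.toNat with hM
  have hr : PySem.List.pyRange 0 ms 1 = PySem.List.pyRange 0 (M:Int) 1 := by
    by_cases h : 0 ≤ ms
    · rw [hM, Int.toNat_of_nonneg h]
    · rw [PySem.List.pyRange_one_eq_nil (by omega), PySem.List.pyRange_one_eq_nil (by omega)]
  -- B's scores
  have h0 : PySem.List.pyRepeat [(0:Int)] ms = (PySem.List.pyRange 0 (M:Int) 1).map (fun _ => (0:Int)) := by
    rw [PySem.List.pyRepeat_singleton, List.map_const', PySem.List.length_pyRange_one]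
    congr 1
  rw [h0, loop_scores query.toList M]
  have hS : (PySem.List.pyRange 0 (M:Int) 1).map (fun qs => (0:Int) +
      ((PySem.List.enumerate subject.toList 0).map (fun p =>
        if some p.2 = PySem.Chars.pyGet? query.toList (qs + p.1) then (1:Int) else -1)).sum)
      = (PySem.List.pyRange 0 (M:Int) 1).map (fun qs => score_match subject query 0 qs n) := by
    apply List.map_congr_left
    intro qs _
    rw [zero_add, F_eq_score_match]
  rw [hS, enum_map_pyRange, List.filter_map, List.map_map]
  -- A's matchList
  rw [hr, PySem.List.foldl_append_ite
    (p := fun qs => score_match subject query 0 qs n ≥ score_limit)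
    (f := fun qs => ((true:Bool), some qs, some (qs + n), some n, some (score_match subject query 0 qs n)))]
  rw [List.nil_append]
  rfl

-- ===== VERDICT (by name: the statement is the Claim_ definition above) =====
theorem try_all_matches_spec : Claim_equal_try_all_matches := by
  intro subject query score_limit _
  unfold Spec_try_all_matches
  exact tam_eq subject query score_limit
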